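-- pv_equiv track=rewrite | github.com/bsshreesha2003/Indian_Army_Encoder | indian/app58/views.py | encode_message
-- ===== SOURCE A (Python) =====
-- def encode_message(message, is_odd_day):
--     odd_encoding = {chr(i): f"{i-64:02}" for i in range(65, 91)}  # A=01, B=02, ..., Z=26
--     even_encoding = {chr(i): f"{i+436:03}" for i in range(65, 91)}  # A=501, B=502, ..., Z=526
--
--     encoding = odd_encoding if is_odd_day else even_encoding
--
--     encoded_message = []
--     for char in message.upper():
--         if char in encoding:
--             encoded_message.append(encoding[char])
--         elif char == ' ':
--             encoded_message.append(' ')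
--         else:
--             encoded_message.append(char)
--     return ''.join(encoded_message)
-- ===== SOURCE B (Python) =====
-- def encode_message(message, is_odd_day):
--     # Staged global substitutions: 26 whole-string replace passes, one per letter.
--     # Safe because every code is all digits, so later passes never touch earlier output.
--     s = message.upper()
--     base = 1 if is_odd_day else 501
--     for i in range(26):
--         s = s.replace(chr(65 + i), f"{base + i:02d}")
--     return s
-- ===== Notes on version B (the rewrite author's own statement) =====
-- stated objective: alternative
-- what changed: Replaced A's per-call construction of two 26-entry dicts plus a single per-character branch-and-append loop by 26 staged whole-string str.replace passes (one global substitution per letter on the uppercased string); this is correct because every code is all digits, so no pass can touch the output of an earlier one, and unmapped characters are left in place exactly as A's else branches do.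
import Mathlib
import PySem

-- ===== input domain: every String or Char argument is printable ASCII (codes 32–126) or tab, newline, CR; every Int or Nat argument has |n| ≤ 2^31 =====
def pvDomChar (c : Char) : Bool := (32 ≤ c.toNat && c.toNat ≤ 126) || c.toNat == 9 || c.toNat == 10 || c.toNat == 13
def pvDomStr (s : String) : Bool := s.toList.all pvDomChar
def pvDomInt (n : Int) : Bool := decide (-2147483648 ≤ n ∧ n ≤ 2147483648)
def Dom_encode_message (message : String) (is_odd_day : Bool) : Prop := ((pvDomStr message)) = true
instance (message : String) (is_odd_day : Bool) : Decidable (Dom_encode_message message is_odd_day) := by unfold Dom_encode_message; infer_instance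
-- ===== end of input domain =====

-- B replaces A's per-character dict-lookup loop by 26 staged whole-string replace passes
-- (one global substitution per letter; codes are all digits so passes cannot interfere) — objective: alternative.


-- ===== PORT A =====
-- f"{n:0w}" for 0 ≤ n: left-pad str(n) with zeros to width w (exact for the nonnegative values A formats)
def pvPadA (w : Nat) (n : Int) : String :=
  String.ofList (List.replicate (w - (PySem.Int.toChars n).length) '0' ++ PySem.Int.toChars n)

def encode_message (message : String) (is_odd_day : Bool) : String :=
  let odd_encoding : PySem.Dict Char String :=
    (PySem.List.pyRange 65 91 1).foldl
      (fun d i => d.insert (Char.ofNat i.toNat) (pvPadA 2 (i - 64))) PySem.Dict.empty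
  let even_encoding : PySem.Dict Char String :=
    (PySem.List.pyRange 65 91 1).foldl
      (fun d i => d.insert (Char.ofNat i.toNat) (pvPadA 3 (i + 436))) PySem.Dict.empty
  let encoding := if is_odd_day then odd_encoding else even_encoding
  let encoded_message : List String :=
    (PySem.Str.upper message).toList.foldl
      (fun acc c =>
        if encoding.contains c then acc ++ [(encoding.get? c).getD ""]   -- encoding[c], guarded by the contains test
        else if c == ' ' then acc ++ [" "]
        else acc ++ [String.ofList [c]]) []
  PySem.Str.join "" encoded_message

-- ===== PORT B =====
-- Source B's f"{m:02d}" for 0 ≤ m is str(m).zfill(2)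
def encode_message_alt (message : String) (is_odd_day : Bool) : String :=
  let s := PySem.Str.upper message
  let base : Int := if is_odd_day then 1 else 501
  (PySem.List.pyRange 0 26 1).foldl
    (fun s i => PySem.Str.replace s (String.ofList [Char.ofNat (65 + i).toNat])
                  (PySem.Str.zfill (PySem.Int.toStr (base + i)) 2)) s

-- ===== PRECONDITION & SPEC =====
def Spec_encode_message (message : String) (is_odd_day : Bool) (out : String) : Prop := out = encode_message_alt message is_odd_day
instance (message : String) (is_odd_day : Bool) (out : String) : Decidable (Spec_encode_message message is_odd_day out) := by unfold Spec_encode_message; infer_instance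

-- ===== CLAIM (what is proved, stated in full; the proofs are below) =====
def Claim_equal_encode_message : Prop := ∀ (message : String) (is_odd_day : Bool), Dom_encode_message message is_odd_day → Spec_encode_message message is_odd_day (encode_message message is_odd_day)

-- ===== LEMMAS AND PROOFS =====
-- A's selected dictionary, and its per-character step, as standalone functions (proof helpers)
def pvDictA (is_odd_day : Bool) : PySem.Dict Char String :=
  if is_odd_day then
    (PySem.List.pyRange 65 91 1).foldl
      (fun d i => d.insert (Char.ofNat i.toNat) (pvPadA 2 (i - 64))) PySem.Dict.empty
  else
    (PySem.List.pyRange 65 91 1).foldl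
      (fun d i => d.insert (Char.ofNat i.toNat) (pvPadA 3 (i + 436))) PySem.Dict.empty

def pvStepA (is_odd_day : Bool) (c : Char) : String :=
  if (pvDictA is_odd_day).contains c then ((pvDictA is_odd_day).get? c).getD ""
  else if c == ' ' then " "
  else String.ofList [c]

lemma pvFoldA_eq_map (enc : PySem.Dict Char String) (l : List Char) (acc : List String) :
    l.foldl (fun acc c =>
        if enc.contains c then acc ++ [(enc.get? c).getD ""]
        else if c == ' ' then acc ++ [" "]
        else acc ++ [String.ofList [c]]) acc
    = acc ++ l.map (fun c =>
        if enc.contains c then (enc.get? c).getD ""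
        else if c == ' ' then " "
        else String.ofList [c]) := by
  have hbody : (fun (acc : List String) c =>
        if enc.contains c then acc ++ [(enc.get? c).getD ""]
        else if c == ' ' then acc ++ [" "]
        else acc ++ [String.ofList [c]])
      = fun acc c => acc ++ [if enc.contains c then (enc.get? c).getD ""
        else if c == ' ' then " " else String.ofList [c]] := by
    funext a c; split_ifs <;> rfl
  rw [hbody, PySem.List.foldl_append_singleton_eq_map]

lemma pvA_eq (message : String) (is_odd_day : Bool) :
    encode_message message is_odd_day
      = PySem.Str.join "" ((PySem.Str.upper message).toList.map (pvStepA is_odd_day)) := by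
  cases is_odd_day <;>
    · simp only [encode_message]
      rw [pvFoldA_eq_map]
      simp only [List.nil_append]
      rfl

-- join with empty separator is concatenation
lemma pvJoin_nil (l : List (List Char)) : PySem.Chars.join [] l = l.flatten := by
  simp only [PySem.Chars.join, List.intercalate]
  induction l with
  | nil => rfl
  | cons x xs ih =>
    cases xs with
    | nil => simp [List.intersperse]
    | cons y ys => simpa [List.intersperse] using ih

-- ---- single-character replace is a per-character substitution ----
def pvSub (p : Char) (r : List Char) (c : Char) : List Char := if c = p then r else [c]

lemma pvGo_single (p : Char) (r : List Char) :
    ∀ (l : List Char) (fuel : Nat) (acc : List Char), l.length ≤ fuel →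
      PySem.Chars.replace.go [p] r fuel l acc = acc.reverse ++ l.flatMap (pvSub p r) := by
  intro l
  induction l with
  | nil =>
    intro fuel acc _
    cases fuel <;> simp [PySem.Chars.replace.go]
  | cons c t ih =>
    intro fuel acc hlen
    cases fuel with
    | zero => simp at hlen
    | succ f =>
      by_cases hc : c = p
      · subst hc
        have hpre : List.isPrefixOf [c] (c :: t) = true := by
          simp [List.isPrefixOf]
        rw [PySem.Chars.replace.go, if_pos hpre]
        simp only [List.length_cons] at hlen
        simp only [List.length_singleton, List.drop_succ_cons, List.drop_zero]
        rw [ih f (r.reverse ++ acc) (by omega)]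
        simp [pvSub]
      · have hpre : List.isPrefixOf [p] (c :: t) = false := by
          simp [List.isPrefixOf]
          exact fun h => hc h.symm
        rw [PySem.Chars.replace.go, if_neg (by simp [hpre])]
        have := ih f (c :: acc) (by simpa using Nat.le_of_succ_le_succ hlen)
        rw [this]
        simp [pvSub, hc]

lemma pvReplace_single (l : List Char) (p : Char) (r : List Char) :
    PySem.Chars.replace l [p] r = l.flatMap (pvSub p r) := by
  rw [PySem.Chars.replace]
  simp only [List.isEmpty_cons]
  exact pvGo_single p r l l.length [] le_rfl

-- ---- B at the Chars level ----
def pvCodeB (b : Bool) (k : Nat) : List Char :=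
  PySem.Chars.zfill (PySem.Int.toChars ((if b then 1 else 501) + (k : Int))) 2

-- the mapping after the first k replace passes have run
def pvG (b : Bool) (k : Nat) (c : Char) : List Char :=
  if 65 ≤ c.toNat ∧ c.toNat < 65 + k then pvCodeB b (c.toNat - 65) else [c]

-- per-character effect of pass k on the output of the first k passes (finite check)
set_option maxHeartbeats 1000000 in
set_option maxRecDepth 8192 in
lemma pvStep_char : ∀ k ∈ List.range 26, ∀ n ∈ List.range 128, ∀ b : Bool,
    (pvG b k (Char.ofNat n)).flatMap (pvSub (Char.ofNat (65 + k)) (pvCodeB b k))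
      = pvG b (k + 1) (Char.ofNat n) := by
  decide

lemma pvStep_char' (b : Bool) (k : Nat) (hk : k < 26) (c : Char) (hc : c.toNat < 128) :
    (pvG b k c).flatMap (pvSub (Char.ofNat (65 + k)) (pvCodeB b k)) = pvG b (k + 1) c := by
  have := pvStep_char k (List.mem_range.mpr hk) c.toNat (List.mem_range.mpr hc) b
  rwa [Char.ofNat_toNat] at this

-- the Chars-level fold of the first k passes
def pvFoldB (b : Bool) (k : Nat) (cs : List Char) : List Char :=
  (PySem.List.pyRange 0 (k : Int) 1).foldl
    (fun l i => PySem.Chars.replace l [Char.ofNat (65 + i).toNat] (pvCodeB b i.toNat)) cs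

lemma pvFoldB_eq (b : Bool) (cs : List Char) (hdom : ∀ c ∈ cs, c.toNat < 128) :
    ∀ k : Nat, k ≤ 26 → pvFoldB b k cs = cs.flatMap (pvG b k) := by
  intro k
  induction k with
  | zero =>
    intro _
    simp only [pvFoldB, Nat.cast_zero, PySem.List.pyRange_one_eq_nil le_rfl, List.foldl_nil]
    have h0 : pvG b 0 = fun c : Char => [c] := by
      funext c; unfold pvG; rw [if_neg (by omega)]
    rw [h0]; simp
  | succ k ih =>
    intro hk
    have hk' : k ≤ 26 := Nat.le_of_succ_le hk
    have hsplit : PySem.List.pyRange 0 ((k : Nat) + 1 : Int) 1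
        = PySem.List.pyRange 0 (k : Int) 1 ++ [(k : Int)] :=
      PySem.List.pyRange_one_succ_right (by positivity)
    simp only [pvFoldB, Nat.cast_succ] at *
    rw [hsplit, List.foldl_append]
    rw [ih hk']
    have hch : Char.ofNat ((65 : Int) + (k : Int)).toNat = Char.ofNat (65 + k) := by
      rw [show ((65 : Int) + (k : Int)).toNat = 65 + k from by omega]
    have htn : ((k : Int)).toNat = k := Int.toNat_natCast k
    simp only [List.foldl_cons, List.foldl_nil, hch, htn]
    rw [pvReplace_single, List.flatMap_assoc]
    exact List.flatMap_congr (fun c hc => pvStep_char' b k (by omega) c (hdom c hc))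

-- B's String-level fold computes the Chars-level fold
lemma pvRepl_toList (b : Bool) (s : String) (i : Int) (hi : 0 ≤ i) :
    (PySem.Str.replace s (String.ofList [Char.ofNat (65 + i).toNat])
        (PySem.Str.zfill (PySem.Int.toStr ((if b then 1 else 501) + i)) 2)).toList
      = PySem.Chars.replace s.toList [Char.ofNat (65 + i).toNat] (pvCodeB b i.toNat) := by
  rw [PySem.Str.toList_replace, PySem.Str.toList_zfill]
  have h2 : ((i.toNat : Int)) = i := by omega
  simp only [pvCodeB, PySem.Int.toStr, h2]
  congr 1 <;> simp

lemma pvFold_toList (b : Bool) : ∀ (ks : List Int), (∀ i ∈ ks, 0 ≤ i) → ∀ (s : String),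
    (ks.foldl (fun s i => PySem.Str.replace s (String.ofList [Char.ofNat (65 + i).toNat])
        (PySem.Str.zfill (PySem.Int.toStr ((if b then 1 else 501) + i)) 2)) s).toList
    = ks.foldl (fun l i => PySem.Chars.replace l [Char.ofNat (65 + i).toNat] (pvCodeB b i.toNat)) s.toList := by
  intro ks
  induction ks with
  | nil => intro _ s; rfl
  | cons i t ih =>
    intro h s
    rw [List.foldl_cons, List.foldl_cons, ih (fun j hj => h j (List.mem_cons_of_mem _ hj)),
        pvRepl_toList b s i (h i (by simp))]

lemma pvB_toList (message : String) (b : Bool) :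
    (encode_message_alt message b).toList = pvFoldB b 26 (PySem.Str.upper message).toList := by
  unfold encode_message_alt pvFoldB
  exact pvFold_toList b _ (fun i hi => (PySem.List.mem_pyRange_one.mp hi).1) _

-- per character (over all chars reachable from the domain), A's table step equals the full 26-pass mapping
set_option maxHeartbeats 1000000 in
set_option maxRecDepth 8192 in
lemma pvKey_all : ∀ n ∈ List.range 128, ∀ b : Bool,
    (pvStepA b (Char.ofNat n)).toList = pvG b 26 (Char.ofNat n) := by
  decide

lemma pvKey (b : Bool) (c : Char) (h : c.toNat < 128) :
    (pvStepA b c).toList = pvG b 26 c := by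
  have := pvKey_all c.toNat (List.mem_range.mpr h) b
  rwa [Char.ofNat_toNat] at this

-- upper of a sub-128 char is sub-128
set_option maxRecDepth 8192 in
lemma pvUpper_small : ∀ n ∈ List.range 128, (PySem.Chars.upperChar (Char.ofNat n)).toNat < 128 := by
  decide

-- ===== VERDICT (by name: the statement is the Claim_ definition above) =====
theorem encode_message_spec : Claim_equal_encode_message := by
  intro message is_odd_day hdom
  unfold Spec_encode_message
  apply String.toList_inj.mp
  rw [pvA_eq, pvB_toList]
  have hdom' : ∀ c ∈ (PySem.Str.upper message).toList, c.toNat < 128 := by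
    intro c hc
    rw [PySem.Str.toList_upper] at hc
    obtain ⟨c0, hc0, rfl⟩ := List.mem_map.mp hc
    have hd : pvDomChar c0 = true := by
      have := (List.all_eq_true.mp hdom) c0 hc0
      simpa using this
    have hlt : c0.toNat < 128 := by
      simp only [pvDomChar, Bool.or_eq_true, Bool.and_eq_true, decide_eq_true_eq, beq_iff_eq] at hd
      omega
    have := pvUpper_small c0.toNat (List.mem_range.mpr hlt)
    rwa [Char.ofNat_toNat] at this
  rw [pvFoldB_eq is_odd_day _ hdom' 26 le_rfl]
  rw [PySem.Str.toList_join]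
  have hsep : ("" : String).toList = [] := rfl
  rw [hsep, pvJoin_nil, List.flatMap_def, List.map_map]
  congr 1
  exact List.map_congr_left (fun c hc => pvKey is_odd_day c (hdom' c hc))
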